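-- pv_equiv track=rewrite | github.com/AzaubaevViktor/hbf | lexer/line.py | _split
-- ===== SOURCE A (Python) =====
-- from typing import Iterable, Tuple, List
--
-- def _split(line: str) -> Iterable[Tuple[int, str]]:
--     word = ""
--     word_pos = 0
--     for pos, ch in enumerate(line):
--         if ch.isspace():
--             if word:
--                 yield word_pos, word
--             word = ""
--             word_pos = pos + 1
--         else:
--             word += ch
--
--     if word:
--         yield word_pos, word
-- ===== SOURCE B (Python) =====
-- from itertools import groupby
-- from typing import Iterable, Tuple
--
-- def _split(line: str) -> Iterable[Tuple[int, str]]: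
--     pos = 0
--     for is_space, chars in groupby(line, key=str.isspace):
--         run = ''.join(chars)
--         if not is_space:
--             yield pos, run
--         pos += len(run)
-- ===== Notes on version B (the rewrite author's own statement) =====
-- stated objective: faster
-- what changed: Replaced A's per-character accumulator state machine (word buffer + word_pos bookkeeping) by an itertools.groupby decomposition of the line into maximal whitespace/non-whitespace runs with a running offset.
import Mathlib
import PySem

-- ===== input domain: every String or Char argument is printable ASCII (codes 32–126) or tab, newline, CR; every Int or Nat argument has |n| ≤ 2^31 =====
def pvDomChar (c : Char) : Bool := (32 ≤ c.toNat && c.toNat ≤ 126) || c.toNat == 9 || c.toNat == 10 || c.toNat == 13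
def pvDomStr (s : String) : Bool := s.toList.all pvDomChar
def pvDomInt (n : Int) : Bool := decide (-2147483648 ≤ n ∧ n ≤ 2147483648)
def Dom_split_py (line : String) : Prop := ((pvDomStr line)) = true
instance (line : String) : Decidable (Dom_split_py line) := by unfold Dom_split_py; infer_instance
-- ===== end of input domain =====

-- B replaces A's per-character accumulator state machine by a groupby-style decomposition
-- into maximal whitespace/non-whitespace runs with a running offset (objective: alternative).

-- ===== PORT A =====
-- A's loop: state (word, word_pos) and the enumerate index pos, one character at a time.
def splitALoop : List Char → List Char → Int → Int → List (Int × String)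
  | [], word, wordPos, _ =>
      if word ≠ [] then [(wordPos, String.ofList word)] else []
  | c :: cs, word, wordPos, pos =>
      if PySem.Chars.isspace c then
        (if word ≠ [] then [(wordPos, String.ofList word)] else []) ++
          splitALoop cs [] (pos + 1) (pos + 1)
      else
        splitALoop cs (word ++ [c]) wordPos (pos + 1)

def split_py (line : String) : List (Int × String) :=
  splitALoop line.toList [] 0 0

-- ===== PORT B =====
-- Source B's groupby: consume the maximal run of characters with the same isspace class as the
-- first character, emit it (with its start offset) when non-space, advance pos by its length.
def splitBLoop : List Char → Int → List (Int × String)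
  | [], _ => []
  | c :: cs, pos =>
      let run := c :: cs.takeWhile (fun d => PySem.Chars.isspace d == PySem.Chars.isspace c)
      let rest := cs.dropWhile (fun d => PySem.Chars.isspace d == PySem.Chars.isspace c)
      if PySem.Chars.isspace c then splitBLoop rest (pos + run.length)
      else (pos, String.ofList run) :: splitBLoop rest (pos + run.length)
  termination_by cs _ => cs.length
  decreasing_by
    all_goals exact Nat.lt_succ_of_le (List.length_dropWhile_le _ _)

def split_py_alt (line : String) : List (Int × String) :=
  splitBLoop line.toList 0

-- ===== PRECONDITION & SPEC =====
def Spec_split_py (line : String) (out : List (Int × String)) : Prop := out = split_py_alt line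
instance (line : String) (out : List (Int × String)) : Decidable (Spec_split_py line out) := by unfold Spec_split_py; infer_instance

-- ===== CLAIM (what is proved, stated in full; the proofs are below) =====
def Claim_equal_split_py : Prop := ∀ (line : String), Dom_split_py line → Spec_split_py line (split_py line)

-- ===== LEMMAS AND PROOFS =====

theorem splitBLoop_nil (pos : Int) : splitBLoop [] pos = [] := by rw [splitBLoop.eq_def]

theorem splitBLoop_cons (c : Char) (cs : List Char) (pos : Int) :
    splitBLoop (c :: cs) pos =
      (let run := c :: cs.takeWhile (fun d => PySem.Chars.isspace d == PySem.Chars.isspace c)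
       let rest := cs.dropWhile (fun d => PySem.Chars.isspace d == PySem.Chars.isspace c)
       if PySem.Chars.isspace c then splitBLoop rest (pos + run.length)
       else (pos, String.ofList run) :: splitBLoop rest (pos + run.length)) := by
  rw [splitBLoop.eq_def]

-- takeWhile/dropWhile over a prefix all of whose elements satisfy p
theorem takeWhile_append_all {α : Type} (p : α → Bool) (w l : List α)
    (h : ∀ x ∈ w, p x = true) :
    (w ++ l).takeWhile p = w ++ l.takeWhile p ∧ (w ++ l).dropWhile p = l.dropWhile p := by
  induction w with
  | nil => simp
  | cons a w ih =>
      have ha : p a = true := h a (List.mem_cons_self ..)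
      have := ih (fun x hx => h x (List.mem_cons_of_mem _ hx))
      simp [ha, this.1, this.2]

-- B's loop consumes a leading space one at a time just as well as run-at-a-time
theorem splitBLoop_space_cons (c : Char) (cs : List Char) (pos : Int)
    (hc : PySem.Chars.isspace c = true) :
    splitBLoop (c :: cs) pos = splitBLoop cs (pos + 1) := by
  cases cs with
  | nil => simp [splitBLoop_cons, splitBLoop_nil, hc]
  | cons d t =>
      by_cases hd : PySem.Chars.isspace d = true
      · rw [splitBLoop_cons, splitBLoop_cons]
        simp only [hc, hd, List.takeWhile_cons, List.dropWhile_cons, beq_self_eq_true,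
          if_true, List.length_cons]
        have harg : ∀ n : Nat, pos + ((n + 1 + 1 : Nat) : Int) = pos + 1 + ((n + 1 : Nat) : Int) := by
          intro n; push_cast; ring
        rw [harg]
      · rw [splitBLoop_cons]
        simp [hc, hd]

-- main invariant: A's loop with pending word `w` (all non-space, starting at wp)
-- equals B's loop run on w ++ cs from offset wp
theorem splitA_eq_splitB (cs : List Char) : ∀ (w : List Char) (wp : Int),
    (∀ x ∈ w, PySem.Chars.isspace x = false) →
    splitALoop cs w wp (wp + w.length) = splitBLoop (w ++ cs) wp := by
  induction cs with
  | nil =>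
      intro w wp hw
      cases w with
      | nil => simp [splitALoop, splitBLoop_nil]
      | cons a w' =>
          have ha : PySem.Chars.isspace a = false := hw a (List.mem_cons_self ..)
          have hall : ∀ x ∈ w', (fun d => PySem.Chars.isspace d == PySem.Chars.isspace a) x = true := by
            intro x hx
            simp [hw x (List.mem_cons_of_mem _ hx), ha]
          have ht : List.takeWhile (fun d => PySem.Chars.isspace d == PySem.Chars.isspace a) w' = w' :=
            List.takeWhile_eq_self_iff.mpr hall
          have hd : List.dropWhile (fun d => PySem.Chars.isspace d == PySem.Chars.isspace a) w' = [] :=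
            List.dropWhile_eq_nil_iff.mpr hall
          rw [List.append_nil, splitALoop, splitBLoop_cons]
          simp only [ht, hd]
          simp [ha, splitBLoop_nil]
  | cons c cs ih =>
      intro w wp hw
      by_cases hc : PySem.Chars.isspace c = true
      · cases w with
        | nil =>
            rw [splitALoop]
            have hIH := ih [] (wp + 1) (by simp)
            simp only [List.nil_append, List.length_nil, Int.natCast_zero, add_zero] at hIH ⊢
            rw [hc, if_pos rfl, hIH, splitBLoop_space_cons c cs wp hc]
            simp
        | cons a w' =>
            have ha : PySem.Chars.isspace a = false := hw a (List.mem_cons_self ..)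
            have hall : ∀ x ∈ w', (fun d => PySem.Chars.isspace d == PySem.Chars.isspace a) x = true := by
              intro x hx; simp [hw x (List.mem_cons_of_mem _ hx), ha]
            obtain ⟨ht, hd⟩ := takeWhile_append_all
              (fun d => PySem.Chars.isspace d == PySem.Chars.isspace a) w' (c :: cs) hall
            have ht' : List.takeWhile (fun d => PySem.Chars.isspace d == PySem.Chars.isspace a)
                (w' ++ c :: cs) = w' := by
              rw [ht, List.takeWhile_cons]; simp [hc, ha]
            have hd' : List.dropWhile (fun d => PySem.Chars.isspace d == PySem.Chars.isspace a)
                (w' ++ c :: cs) = c :: cs := by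
              rw [hd, List.dropWhile_cons]; simp [hc, ha]
            have hIH := ih [] ((wp + (((a :: w').length : Nat) : Int)) + 1) (by simp)
            simp only [List.nil_append, List.length_nil, Int.natCast_zero, add_zero] at hIH
            rw [splitALoop, hc, if_pos rfl, if_pos (by simp), hIH]
            conv_rhs => rw [List.cons_append, splitBLoop_cons a (w' ++ c :: cs) wp]
            simp only [ht', hd']
            rw [if_neg (by simp [ha])]
            rw [splitBLoop_space_cons c cs _ hc]
            simp
      · rw [splitALoop, if_neg hc]
        have hw' : ∀ x ∈ w ++ [c], PySem.Chars.isspace x = false := by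
          intro x hx
          rcases List.mem_append.mp hx with h | h
          · exact hw x h
          · simp at h; subst h; simpa using hc
        have hIH := ih (w ++ [c]) wp hw'
        have harg : wp + (w.length : Int) + 1 = wp + (((w ++ [c]).length : Nat) : Int) := by
          push_cast [List.length_append, List.length_cons, List.length_nil]; ring
        rw [harg, hIH, List.append_assoc]
        simp

-- ===== VERDICT (by name: the statement is the Claim_ definition above) =====
theorem split_py_spec : Claim_equal_split_py := by
  intro line _
  unfold Spec_split_py split_py split_py_alt
  simpa using splitA_eq_splitB line.toList [] 0 (by simp)
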